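-- pv_equiv track=rewrite | github.com/venkman69/adventofcode2023 | 07.py | handtoint
-- ===== SOURCE A (Python) =====
-- cardvalue={
-- "A":14,
-- "K":13,
-- "Q":12,
-- "J":1,
-- "T":10,
-- "9":9,
-- "8":8,
-- "7":7,
-- "6":6,
-- "5":5,
-- "4":4,
-- "3":3,
-- "2":2,
-- }
--
-- def handtoint(hand):
--     revhand = hand[::-1]
--     base = 15
--     base10num=0
--     ind=0
--     for card in revhand:
--         base10num = base10num+ cardvalue[card]* (base**ind)
--         ind+=1
--
--     return(base10num)
-- ===== SOURCE B (Python) =====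
-- cardvalue={
-- "A":14,
-- "K":13,
-- "Q":12,
-- "J":1,
-- "T":10,
-- "9":9,
-- "8":8,
-- "7":7,
-- "6":6,
-- "5":5,
-- "4":4,
-- "3":3,
-- "2":2,
-- }
--
-- def _go(s, acc):
--     if not s:
--         return acc
--     return _go(s[1:], acc * 15 + cardvalue[s[0]])
--
-- def handtoint(hand):
--     return _go(hand, 0)
-- ===== Notes on version B (the rewrite author's own statement) =====
-- stated objective: idiomatic
-- what changed: Replaces the reverse-slice plus base**index summation loop with a tail-recursive Horner accumulator that consumes the string front-to-back (acc = acc*15 + value), removing the reversal, the index counter and the exponentiation.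
import Mathlib
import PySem

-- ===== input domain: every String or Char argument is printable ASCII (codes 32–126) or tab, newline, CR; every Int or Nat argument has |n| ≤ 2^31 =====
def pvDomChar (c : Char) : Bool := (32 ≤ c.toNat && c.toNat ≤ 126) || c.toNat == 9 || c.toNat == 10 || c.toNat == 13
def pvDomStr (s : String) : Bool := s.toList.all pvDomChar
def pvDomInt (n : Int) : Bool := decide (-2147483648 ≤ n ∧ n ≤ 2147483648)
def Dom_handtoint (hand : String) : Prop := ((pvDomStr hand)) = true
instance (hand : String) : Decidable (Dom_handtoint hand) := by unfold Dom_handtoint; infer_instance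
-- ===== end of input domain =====

-- B replaces the reverse-slice + base**index sum with a tail-recursive Horner accumulator (idiomatic); return values proved equal on Pre_.

-- the module-level cardvalue dict, shared by both Pythons
def cardvalue : PySem.Dict Char Int :=
  PySem.Dict.ofList [('A',14),('K',13),('Q',12),('J',1),('T',10),('9',9),('8',8),('7',7),('6',6),('5',5),('4',4),('3',3),('2',2)]

-- ===== PORT A =====
-- A: reverse the hand, then sum cardvalue[card] * 15^ind with an explicit index counter.
-- cardvalue[card] raises KeyError outside Pre_; on Pre_ every key is present, ported via getD.
def handtoint (hand : String) : Int :=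
  let revhand := (PySem.List.slice? hand.toList none none (-1)).getD []
  let base : Int := 15
  let r := revhand.foldl
    (fun (s : Int × Nat) card => (s.1 + (PySem.Dict.getD cardvalue card 0) * base ^ s.2, s.2 + 1))
    (0, 0)
  r.1

-- ===== PORT B =====
-- B: tail-recursive helper _go(s, acc): empty test, else recurse on s[1:] (the tail) with acc*15 + cardvalue[s[0]].
def handtointGo : List Char → Int → Int
  | [], acc => acc
  | c :: t, acc => handtointGo t (acc * 15 + PySem.Dict.getD cardvalue c 0)

def handtoint_alt (hand : String) : Int := handtointGo hand.toList 0

-- ===== PRECONDITION & SPEC =====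
-- Pre_ excludes hands containing a character that is not one of the 13 card symbols:
-- there cardvalue[card] raises KeyError in both A and B.
def Pre_handtoint (hand : String) : Prop :=
  (hand.toList.all (fun c => ['A','K','Q','J','T','9','8','7','6','5','4','3','2'].contains c)) = true
instance (hand : String) : Decidable (Pre_handtoint hand) := by unfold Pre_handtoint; infer_instance

def pvWitness_handtoint : String := "KQJT9"

def Spec_handtoint (hand : String) (out : Int) : Prop := out = handtoint_alt hand
instance (hand : String) (out : Int) : Decidable (Spec_handtoint hand out) := by unfold Spec_handtoint; infer_instance

-- ===== CLAIM (what is proved, stated in full; the proofs are below) =====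
def Claim_equal_handtoint : Prop := ∀ (hand : String), Dom_handtoint hand → Pre_handtoint hand → Spec_handtoint hand (handtoint hand)

-- ===== LEMMAS AND PROOFS =====

-- value of a card
def cv (c : Char) : Int := PySem.Dict.getD cardvalue c 0

-- place-value sum of a list starting at exponent i (A's loop, denotationally)
def S : List Char → Nat → Int
  | [], _ => 0
  | c :: t, i => cv c * 15 ^ i + S t (i + 1)

lemma foldlA_eq_S (l : List Char) (b : Int) (i : Nat) :
    (l.foldl (fun (s : Int × Nat) card => (s.1 + cv card * (15:Int) ^ s.2, s.2 + 1)) (b, i)).1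
      = b + S l i := by
  induction l generalizing b i with
  | nil => simp [S]
  | cons c t ih => simp [List.foldl, ih, S]; ring

lemma S_append (l : List Char) (c : Char) (i : Nat) :
    S (l ++ [c]) i = S l i + cv c * 15 ^ (i + l.length) := by
  induction l generalizing i with
  | nil => simp [S]
  | cons d t ih => simp [S, ih]; ring_nf

lemma go_shift (l : List Char) (a : Int) :
    handtointGo l a = a * 15 ^ l.length + handtointGo l 0 := by
  induction l generalizing a with
  | nil => simp [handtointGo]
  | cons c t ih =>
    simp only [handtointGo, List.length_cons]
    rw [ih (a * 15 + PySem.Dict.getD cardvalue c 0),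
        ih (0 * 15 + PySem.Dict.getD cardvalue c 0)]
    ring

lemma S_reverse_eq_go (l : List Char) :
    S l.reverse 0 = handtointGo l 0 := by
  induction l with
  | nil => simp [S, handtointGo]
  | cons c t ih =>
    simp only [List.reverse_cons, handtointGo]
    rw [S_append, ih, go_shift t (0 * 15 + PySem.Dict.getD cardvalue c 0)]
    simp [cv]
    ring

-- ===== VERDICT (by name: the statement is the Claim_ definition above) =====
theorem handtoint_spec : Claim_equal_handtoint := by
  intro hand _ _
  unfold Spec_handtoint handtoint handtoint_alt
  simp only [PySem.List.slice?_none_none_neg_one, Option.getD_some,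
    show ∀ c, PySem.Dict.getD cardvalue c 0 = cv c from fun _ => rfl]
  rw [foldlA_eq_S, zero_add, S_reverse_eq_go]
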